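-- pv_equiv track=rewrite | github.com/OfficialBika/BikaHelpBot | app/modules/greetings.py | parse_welcome_buttons
-- ===== SOURCE A (Python) =====
-- def parse_welcome_buttons(raw: str) -> list[list[dict[str, str]]]:
--     buttons: list[dict[str, str]] = []
--     for part in [x.strip() for x in raw.split(";") if x.strip()]:
--         if "|" not in part:
--             continue
--         label, url = part.split("|", 1)
--         label = label.strip()
--         url = url.strip()
--         if not label or not url:
--             continue
--         if not (url.startswith("http://") or url.startswith("https://") or url.startswith("tg://") or url.startswith("https://t.me/")):
--             continue
--         buttons.append({"text": label[:64], "url": url})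
--     rows: list[list[dict[str, str]]] = []
--     for i in range(0, len(buttons), 2):
--         rows.append(buttons[i:i + 2])
--     return rows[:5]
-- ===== SOURCE B (Python) =====
-- def _parse_button(part: str):
--     part = part.strip()
--     i = part.find("|")
--     if i < 0:
--         return None
--     label = part[:i].strip()
--     url = part[i + 1:].strip()
--     if not label or not url:
--         return None
--     if not url.startswith(("http://", "https://", "tg://")):
--         return None
--     return {"text": label[:64], "url": url}
--
--
-- def parse_welcome_buttons(raw: str) -> list[list[dict[str, str]]]:
--     rows: list[list[dict[str, str]]] = []
--     current: list[dict[str, str]] = []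
--     for part in raw.split(";"):
--         if len(rows) == 5:
--             break
--         btn = _parse_button(part)
--         if btn is None:
--             continue
--         current.append(btn)
--         if len(current) == 2:
--             rows.append(current)
--             current = []
--     if current and len(rows) < 5:
--         rows.append(current)
--     return rows
-- ===== Notes on version B (the rewrite author's own statement) =====
-- stated objective: alternative
-- what changed: B replaces A's three passes (strip-filter comprehension, validated button list, range-step-2 chunking plus rows[:5]) with a single streaming loop that parses each ';'-part via find/slice-based partition (one helper), fills a 2-button current row, flushes it into rows, and stops as soon as 5 rows exist; the redundant 'https://t.me/' prefix test (subsumed by 'https://') is dropped.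
import Mathlib
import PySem

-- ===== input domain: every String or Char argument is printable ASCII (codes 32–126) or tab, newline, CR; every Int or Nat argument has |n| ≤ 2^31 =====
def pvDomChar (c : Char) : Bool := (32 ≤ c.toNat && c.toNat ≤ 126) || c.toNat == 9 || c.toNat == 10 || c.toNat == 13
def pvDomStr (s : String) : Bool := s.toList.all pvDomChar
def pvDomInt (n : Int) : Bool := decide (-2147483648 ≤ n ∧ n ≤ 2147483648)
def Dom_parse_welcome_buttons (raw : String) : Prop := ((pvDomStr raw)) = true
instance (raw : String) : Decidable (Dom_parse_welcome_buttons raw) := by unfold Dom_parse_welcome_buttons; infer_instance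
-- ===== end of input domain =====

set_option maxHeartbeats 1000000


-- B streams the ';'-parts once, parsing each with a find/slice partition and filling 2-button rows
-- directly (stopping at 5 rows), instead of A's filter pass + flat button list + range-step-2 chunking + rows[:5].

-- ===== PORT A =====
def parse_welcome_buttons (raw : String) : List (List (List (String × String))) :=
  let parts := ((PySem.Str.split? raw ";").getD []).filterMap (fun x =>
      let s := PySem.Str.strip x
      if s ≠ "" then some s else none)
  let buttons := parts.foldl (fun btns part =>
      if PySem.Str.isIn "|" part = false then btns else
      let pieces := (PySem.Str.splitMax? part "|" 1).getD []
      let label := PySem.Str.strip (pieces.getD 0 "")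
      let url := PySem.Str.strip (pieces.getD 1 "")
      if label = "" ∨ url = "" then btns else
      if ¬ (PySem.Str.startswith url "http://" = true ∨ PySem.Str.startswith url "https://" = true ∨
            PySem.Str.startswith url "tg://" = true ∨ PySem.Str.startswith url "https://t.me/" = true) then btns
      else btns ++ [[("text", PySem.Str.slice label none (some 64)), ("url", url)]]) []
  let rows := (PySem.List.pyRange 0 (buttons.length : Int) 2).foldl
      (fun rows i => rows ++ [PySem.List.slice buttons (some i) (some (i + 2))]) []
  PySem.List.slice rows none (some 5)

-- ===== PORT B =====
-- port of Source B's _parse_button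
def altBtn? (x : String) : Option (List (String × String)) :=
  let p := PySem.Str.strip x
  let i := PySem.Str.find p "|"
  if i < 0 then none
  else
    let label := PySem.Str.strip (PySem.Str.slice p none (some i))
    let url := PySem.Str.strip (PySem.Str.slice p (some (i + 1)) none)
    if label = "" ∨ url = "" then none
    else if PySem.Str.startswith url "http://" = true ∨ PySem.Str.startswith url "https://" = true ∨
            PySem.Str.startswith url "tg://" = true then
      some [("text", PySem.Str.slice label none (some 64)), ("url", url)]
    else none

-- the post-loop flush: `if current and len(rows) < 5: rows.append(current)`
def altFlush (rows : List (List (List (String × String)))) (current : List (List (String × String))) :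
    List (List (List (String × String))) :=
  if current ≠ [] ∧ rows.length < 5 then rows ++ [current] else rows

-- Source B's loop; `break` at 5 rows falls through to the flush
def altLoop : List String → List (List (List (String × String))) → List (List (String × String)) →
    List (List (List (String × String)))
  | [], rows, current => altFlush rows current
  | part :: rest, rows, current =>
    if rows.length = 5 then altFlush rows current
    else match altBtn? part with
      | none => altLoop rest rows current
      | some btn =>
        let cur := current ++ [btn]
        if cur.length = 2 then altLoop rest (rows ++ [cur]) [] else altLoop rest rows cur

def parse_welcome_buttons_alt (raw : String) : List (List (List (String × String))) :=
  altLoop ((PySem.Str.split? raw ";").getD []) [] []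

-- ===== PRECONDITION & SPEC =====
def Spec_parse_welcome_buttons (raw : String) (out : List (List (List (String × String)))) : Prop := out = parse_welcome_buttons_alt raw
instance (raw : String) (out : List (List (List (String × String)))) : Decidable (Spec_parse_welcome_buttons raw out) := by unfold Spec_parse_welcome_buttons; infer_instance

-- ===== CLAIM (what is proved, stated in full; the proofs are below) =====
def Claim_equal_parse_welcome_buttons : Prop := ∀ (raw : String), Dom_parse_welcome_buttons raw → Spec_parse_welcome_buttons raw (parse_welcome_buttons raw)

-- ===== LEMMAS AND PROOFS =====

theorem goZero (fuel : Nat) : ∀ (l cur : List Char) (acc : List (List Char)),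
    PySem.Chars.splitOnMax.go ['|'] fuel 0 l cur acc = ((cur.reverse ++ l) :: acc).reverse := by
  induction fuel with
  | zero => intro l cur acc; rw [PySem.Chars.splitOnMax.go.eq_def]
  | succ f ih =>
    intro l cur acc
    cases l with
    | nil => rw [PySem.Chars.splitOnMax.go.eq_def]; simp
    | cons c rest => rw [PySem.Chars.splitOnMax.go.eq_def]; simp

theorem goSplit (fuel : Nat) : ∀ (l cur : List Char) (acc : List (List Char)), l.length < fuel →
    PySem.Chars.splitOnMax.go ['|'] fuel 1 l cur acc =
      if '|' ∈ l then
        acc.reverse ++ [cur.reverse ++ l.take (l.idxOf '|'), l.drop (l.idxOf '|' + 1)]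
      else acc.reverse ++ [cur.reverse ++ l] := by
  induction fuel with
  | zero => intro l cur acc h; omega
  | succ f ih =>
    intro l cur acc h
    cases l with
    | nil => rw [PySem.Chars.splitOnMax.go.eq_def]; simp
    | cons c rest =>
      rw [PySem.Chars.splitOnMax.go.eq_def]
      simp only [show (1:Nat) ≠ 0 from by omega, if_false]
      by_cases hc : c = '|'
      · subst hc
        have hp : List.isPrefixOf ['|'] ('|' :: rest) = true := by simp [List.isPrefixOf]
        rw [if_pos hp, goZero]
        simp [List.idxOf_cons_self]
      · have hp : List.isPrefixOf ['|'] (c :: rest) = false := by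
          simp [List.isPrefixOf]; exact fun h => (hc h.symm).elim
        rw [hp]
        simp only [Bool.false_eq_true, if_false]
        rw [ih rest (c :: cur) acc (by simpa using Nat.lt_of_succ_lt_succ h)]
        by_cases hm : '|' ∈ rest
        · rw [if_pos hm, if_pos (List.mem_cons_of_mem _ hm)]
          rw [List.idxOf_cons_ne _ hc]
          simp
        · rw [if_neg hm, if_neg (by simp [hm]; exact fun h => (hc h.symm).elim)]
          simp

theorem splitMax_bar (l : List Char) (h : '|' ∈ l) :
    PySem.Chars.splitOnMax l ['|'] 1 = [l.take (l.idxOf '|'), l.drop (l.idxOf '|' + 1)] := by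
  rw [PySem.Chars.splitOnMax]
  rw [if_neg (by omega)]
  simp only [Int.toNat_one]
  rw [goSplit (l.length + 1) l [] [] (by omega), if_pos h]
  simp

theorem findgo_bar (l : List Char) : ∀ k : Nat, PySem.Chars.find.go ['|'] l k =
    if '|' ∈ l then ((k : Int) + l.idxOf '|') else -1 := by
  induction l with
  | nil => intro k; simp [PySem.Chars.find.go]
  | cons c t ih =>
    intro k
    rw [PySem.Chars.find.go]
    by_cases hc : c = '|'
    · subst hc; simp [List.isPrefixOf]
    · have hp : List.isPrefixOf ['|'] (c :: t) = false := by
        simp [List.isPrefixOf]; exact fun h => (hc h.symm).elim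
      rw [hp]
      simp only [Bool.false_eq_true, if_false]
      rw [ih (k + 1)]
      by_cases hm : '|' ∈ t
      · rw [if_pos hm, if_pos (List.mem_cons_of_mem _ hm), List.idxOf_cons_ne _ hc]
        push_cast; ring
      · rw [if_neg hm, if_neg (by simp [hm]; exact fun h => (hc h.symm).elim)]

theorem find_bar (l : List Char) :
    PySem.Chars.find l ['|'] = if '|' ∈ l then (l.idxOf '|' : Int) else -1 := by
  rw [PySem.Chars.find, findgo_bar]
  simp

def coreBtn? (p : String) : Option (List (String × String)) :=
  let i := PySem.Str.find p "|"
  if i < 0 then none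
  else
    let label := PySem.Str.strip (PySem.Str.slice p none (some i))
    let url := PySem.Str.strip (PySem.Str.slice p (some (i + 1)) none)
    if label = "" ∨ url = "" then none
    else if PySem.Str.startswith url "http://" = true ∨ PySem.Str.startswith url "https://" = true ∨
            PySem.Str.startswith url "tg://" = true then
      some [("text", PySem.Str.slice label none (some 64)), ("url", url)]
    else none

def aBody (btns : List (List (String × String))) (part : String) : List (List (String × String)) :=
  if PySem.Str.isIn "|" part = false then btns else
  let pieces := (PySem.Str.splitMax? part "|" 1).getD []
  let label := PySem.Str.strip (pieces.getD 0 "")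
  let url := PySem.Str.strip (pieces.getD 1 "")
  if label = "" ∨ url = "" then btns else
  if ¬ (PySem.Str.startswith url "http://" = true ∨ PySem.Str.startswith url "https://" = true ∨
        PySem.Str.startswith url "tg://" = true ∨ PySem.Str.startswith url "https://t.me/" = true) then btns
  else btns ++ [[("text", PySem.Str.slice label none (some 64)), ("url", url)]]

theorem tme_imp (url : String) (h : PySem.Str.startswith url "https://t.me/" = true) :
    PySem.Str.startswith url "https://" = true := by
  rw [PySem.Str.startswith, PySem.Chars.startswith_iff] at h ⊢
  exact List.IsPrefix.trans (by decide) h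

theorem aBody_eq (btns : List (List (String × String))) (part : String) :
    aBody btns part = btns ++ (coreBtn? part).toList := by
  have hbl : ("|" : String).toList = ['|'] := by decide
  by_cases hm : '|' ∈ part.toList
  · have hfind : PySem.Str.find part "|" = (part.toList.idxOf '|' : Int) := by
      rw [PySem.Str.find, hbl, find_bar, if_pos hm]
    have hin : PySem.Str.isIn "|" part = true := by
      rw [PySem.Str.isIn, PySem.Chars.isIn, hbl, find_bar, if_pos hm]
      simp
    set n := part.toList.idxOf '|' with hn
    have hpieces : (PySem.Str.splitMax? part "|" 1).getD [] =
        [String.ofList (part.toList.take n), String.ofList (part.toList.drop (n + 1))] := by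
      rw [PySem.Str.splitMax?, hbl, PySem.Chars.splitMax?,
        if_neg (by simp), splitMax_bar _ hm]
      rfl
    have hlabel : PySem.Str.slice part none (some ((n : Int))) =
        String.ofList (part.toList.take n) := by
      rw [PySem.Str.slice]
      congr 1
      rw [PySem.Chars.slice_eq_listSlice, PySem.List.slice_to_natCast]
    have hurl : PySem.Str.slice part (some ((n : Int) + 1)) none =
        String.ofList (part.toList.drop (n + 1)) := by
      rw [PySem.Str.slice]
      congr 1
      rw [PySem.Chars.slice_eq_listSlice, show ((n : Int) + 1) = ((n + 1 : Nat) : Int) from by push_cast; ring,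
        PySem.List.slice_from_natCast]
    rw [aBody, coreBtn?]
    simp only [hfind, hin, hpieces, List.getD_cons_zero, List.getD_cons_succ, hlabel, hurl]
    rw [if_neg (show ¬ (true = false) from by simp), if_neg (show ¬ ((n : Int) < 0) from by omega)]
    by_cases hempty : PySem.Str.strip (String.ofList (part.toList.take n)) = "" ∨
        PySem.Str.strip (String.ofList (part.toList.drop (n + 1))) = ""
    · rw [if_pos hempty, if_pos hempty]; simp
    · rw [if_neg hempty, if_neg hempty]
      set url := PySem.Str.strip (String.ofList (part.toList.drop (n + 1)))
      by_cases hsw : PySem.Str.startswith url "http://" = true ∨ PySem.Str.startswith url "https://" = true ∨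
          PySem.Str.startswith url "tg://" = true
      · rw [if_pos hsw, if_neg (show ¬ ¬ (PySem.Str.startswith url "http://" = true ∨ PySem.Str.startswith url "https://" = true ∨
            PySem.Str.startswith url "tg://" = true ∨ PySem.Str.startswith url "https://t.me/" = true) from fun hnn => hnn (hsw.elim Or.inl (fun h => h.elim (fun h2 => Or.inr (Or.inl h2)) (fun h3 => Or.inr (Or.inr (Or.inl h3))))))]
        simp
      · have hsw4 : ¬ (PySem.Str.startswith url "http://" = true ∨ PySem.Str.startswith url "https://" = true ∨
            PySem.Str.startswith url "tg://" = true ∨ PySem.Str.startswith url "https://t.me/" = true) := by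
          intro h
          rcases h with h | h | h | h
          · exact hsw (Or.inl h)
          · exact hsw (Or.inr (Or.inl h))
          · exact hsw (Or.inr (Or.inr h))
          · exact hsw (Or.inr (Or.inl (tme_imp url h)))
        rw [if_neg hsw, if_pos hsw4]
        simp
  · have hfind : PySem.Str.find part "|" = -1 := by
      rw [PySem.Str.find, hbl, find_bar, if_neg hm]
    have hin : PySem.Str.isIn "|" part = false := by
      rw [PySem.Str.isIn, PySem.Chars.isIn, hbl, find_bar, if_neg hm]
      simp
    rw [aBody, coreBtn?]
    simp only [hin, hfind]
    norm_num

theorem altBtn?_eq (x : String) : altBtn? x = coreBtn? (PySem.Str.strip x) := rfl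

theorem coreBtn?_empty : coreBtn? "" = none := by decide

def pStrip? (x : String) : Option String :=
  let s := PySem.Str.strip x
  if s ≠ "" then some s else none

theorem foldl_aBody (xs : List String) : ∀ btns : List (List (String × String)),
    (xs.filterMap pStrip?).foldl aBody btns = btns ++ xs.filterMap altBtn? := by
  induction xs with
  | nil => intro btns; simp
  | cons x xs ih =>
    intro btns
    rw [List.filterMap_cons, List.filterMap_cons]
    by_cases h : PySem.Str.strip x = ""
    · have hb : altBtn? x = none := by rw [altBtn?_eq, h, coreBtn?_empty]
      have hf : pStrip? x = none := by simp [pStrip?, h]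
      rw [hb, hf, ih btns]
    · have hf : pStrip? x = some (PySem.Str.strip x) := by simp [pStrip?, h]
      rw [hf, altBtn?_eq x, List.foldl_cons, aBody_eq, ih]
      cases coreBtn? (PySem.Str.strip x) <;> simp

def chunk2 {α : Type} : List α → List (List α)
  | [] => []
  | [a] => [[a]]
  | a :: b :: t => [a, b] :: chunk2 t

theorem chunk2_eq {α : Type} : ∀ bs : List α,
    (List.range ((bs.length + 1) / 2)).map (fun k => (bs.drop (2 * k)).take 2) = chunk2 bs := by
  intro bs
  induction bs using chunk2.induct with
  | case1 => simp [chunk2]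
  | case2 a => simp [chunk2]
  | case3 a b t ih =>
    have hlen : ((a :: b :: t).length + 1) / 2 = (t.length + 1) / 2 + 1 := by
      simp [List.length_cons]; omega
    rw [hlen, List.range_succ_eq_map, List.map_cons, List.map_map]
    rw [show chunk2 (a :: b :: t) = [a, b] :: chunk2 t from rfl]
    refine congrArg₂ List.cons (by simp) ?_
    rw [← ih]
    apply List.map_congr_left
    intro k _
    show ((a :: b :: t).drop (2 * (k + 1))).take 2 = (t.drop (2 * k)).take 2
    have h2 : 2 * (k + 1) = 2 * k + 1 + 1 := by ring
    rw [h2]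
    rfl

theorem aRows_eq (bs : List (List (String × String))) :
    (PySem.List.pyRange 0 (bs.length : Int) 2).foldl
      (fun rows i => rows ++ [PySem.List.slice bs (some i) (some (i + 2))]) [] = chunk2 bs := by
  rw [PySem.List.foldl_append_singleton_eq_map]
  rw [PySem.List.pyRange]
  rw [if_neg (by omega)]
  have hcnt : (if (0:Int) < 2 then if (0:Int) < (bs.length : Int) then (((bs.length : Int) - 0 + 2 - 1) / 2).toNat else 0
      else if (bs.length : Int) < 0 then (((0:Int) - (bs.length:Int) + -2 - 1) / (-2)).toNat else 0) = (bs.length + 1) / 2 := by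
    rw [if_pos (by omega)]
    by_cases h : (0:Int) < (bs.length : Int)
    · rw [if_pos h]
      have : ((bs.length : Int) - 0 + 2 - 1) = ((bs.length : Int) + 1) := by ring
      rw [this]
      omega
    · rw [if_neg h]
      omega
  rw [hcnt, List.map_map]
  rw [← chunk2_eq]
  apply List.map_congr_left
  intro k _
  show PySem.List.slice bs (some (0 + 2 * (k : Int))) (some (0 + 2 * (k : Int) + 2)) = (bs.drop (2 * k)).take 2
  have h1 : (0 + 2 * (k : Int)) = ((2 * k : Nat) : Int) := by push_cast; ring
  rw [h1]
  exact_mod_cast PySem.List.slice_natCast_add bs (2 * k) 2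

theorem altLoop_eq (parts : List String) : ∀ (rows : List (List (List (String × String))))
    (current : List (List (String × String))),
    rows.length ≤ 5 → current.length ≤ 1 → (current ≠ [] → rows.length < 5) →
    altLoop parts rows current =
      rows ++ (chunk2 (current ++ parts.filterMap altBtn?)).take (5 - rows.length) := by
  induction parts with
  | nil =>
    intro rows current h1 h2 h3
    rw [altLoop, altFlush]
    cases current with
    | nil => simp [chunk2]
    | cons c cs =>
      have hcs : cs = [] := by cases cs <;> simp_all
      subst hcs
      have h5 : rows.length < 5 := h3 (by simp)
      rw [if_pos ⟨by simp, h5⟩]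
      rw [show ([c] : List (List (String × String))) ++ [].filterMap altBtn? = [c] from by simp]
      rw [show chunk2 [c] = [[c]] from rfl]
      rw [List.take_of_length_le (by simp; omega)]
  | cons p rest ih =>
    intro rows current h1 h2 h3
    rw [altLoop]
    by_cases h5 : rows.length = 5
    · have hc : current = [] := by
        by_contra hne
        exact absurd (h3 hne) (by omega)
      subst hc
      rw [if_pos h5, altFlush, if_neg (by simp)]
      simp [h5]
    · rw [if_neg h5, List.filterMap_cons]
      cases hb : altBtn? p with
      | none =>
        dsimp only
        exact ih rows current h1 h2 h3
      | some btn =>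
        dsimp only
        cases current with
        | nil =>
          rw [if_neg (show ¬ (([] ++ [btn] : List (List (String × String))).length = 2) from by simp)]
          rw [ih rows ([] ++ [btn]) h1 (by simp) (fun _ => by omega)]
          simp
        | cons c cs =>
          have hcs : cs = [] := by cases cs <;> simp_all
          subst hcs
          have hlt : rows.length < 5 := h3 (by simp)
          rw [if_pos (show (([c] ++ [btn] : List (List (String × String))).length = 2) from by simp)]
          rw [ih (rows ++ [[c] ++ [btn]]) [] (by simp; omega) (by simp) (by simp)]
          rw [show ([c] ++ [btn] : List (List (String × String))) = [c, btn] from rfl]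
          rw [show (([c] : List (List (String × String))) ++ btn :: rest.filterMap altBtn?) = c :: btn :: rest.filterMap altBtn? from rfl]
          rw [show chunk2 (c :: btn :: rest.filterMap altBtn?) = [c, btn] :: chunk2 (rest.filterMap altBtn?) from rfl]
          have htake : 5 - rows.length = (5 - (rows.length + 1)) + 1 := by omega
          rw [htake, List.take_succ_cons]
          simp

theorem parse_welcome_buttons_main (raw : String) :
    parse_welcome_buttons raw = parse_welcome_buttons_alt raw := by
  have hA : parse_welcome_buttons raw = PySem.List.slice
      ((PySem.List.pyRange 0 (((((PySem.Str.split? raw ";").getD []).filterMap pStrip?).foldl aBody []).length : Int) 2).foldl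
        (fun rows i => rows ++ [PySem.List.slice ((((PySem.Str.split? raw ";").getD []).filterMap pStrip?).foldl aBody [])
          (some i) (some (i + 2))]) [])
      none (some 5) := rfl
  have hB : parse_welcome_buttons_alt raw = altLoop ((PySem.Str.split? raw ";").getD []) [] [] := rfl
  rw [hA, hB]
  rw [foldl_aBody, List.nil_append, aRows_eq]
  rw [altLoop_eq _ [] [] (by simp) (by simp) (by simp)]
  rw [PySem.List.slice_to _ (show (0:Int) ≤ 5 from by omega)]
  simp

-- ===== VERDICT (by name: the statement is the Claim_ definition above) =====
theorem parse_welcome_buttons_spec : Claim_equal_parse_welcome_buttons := by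
  intro raw _
  unfold Spec_parse_welcome_buttons
  exact parse_welcome_buttons_main raw
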